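-- pv_equiv track=rewrite | github.com/deis/deis | api/tests/container.py | get_allocations
-- ===== SOURCE A (Python) =====
-- def get_allocations(container_dict):
--     counts = {}
--     for container in container_dict.values():
--         name, _id = container.split(':')
--         if name in counts:
--             counts[name] += 1
--         else:
--             counts[name] = 1
--     return sorted(counts.values())
-- ===== SOURCE B (Python) =====
-- def get_allocations(container_dict):
--     names = []
--     for container in container_dict.values():
--         name, _id = container.split(':')
--         names.append(name)
--     names.sort()
--     counts = []
--     i = 0
--     n = len(names)
--     while i < n:
--         j = i + 1
--         while j < n and names[j] == names[i]:
--             j += 1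
--         counts.append(j - i)
--         i = j
--     return sorted(counts)
-- ===== Notes on version B (the rewrite author's own statement) =====
-- stated objective: alternative
-- what changed: Replaces A's dict-based count accumulation by collecting the names, sorting them, and emitting the length of each consecutive run with a two-pointer scan.
import Mathlib
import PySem

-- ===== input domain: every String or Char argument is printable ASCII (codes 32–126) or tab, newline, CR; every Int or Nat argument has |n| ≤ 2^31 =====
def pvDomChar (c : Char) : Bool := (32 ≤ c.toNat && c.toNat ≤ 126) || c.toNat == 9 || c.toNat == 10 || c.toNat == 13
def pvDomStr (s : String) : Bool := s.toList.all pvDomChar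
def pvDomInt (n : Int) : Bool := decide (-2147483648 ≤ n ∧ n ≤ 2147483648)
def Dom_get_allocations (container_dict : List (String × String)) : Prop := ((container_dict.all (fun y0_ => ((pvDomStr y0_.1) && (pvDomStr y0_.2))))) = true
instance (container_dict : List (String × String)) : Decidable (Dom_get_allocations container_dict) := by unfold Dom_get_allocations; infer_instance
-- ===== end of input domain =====

-- B replaces A's hash-map count accumulation by extracting the name list, sorting it and
-- emitting consecutive run lengths (objective: alternative algorithm, same result).

-- ===== PORT A =====
-- the name in 'name, _id = container.split(":")'; Pre_ guarantees the split has exactly 2 parts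
def pvName (container : String) : String :=
  ((PySem.Str.split? container ":").getD []).headD ""

def get_allocations (container_dict : List (String × String)) : List Int :=
  let counts : PySem.Dict String Int :=
    (PySem.Dict.update PySem.Dict.empty container_dict).values.foldl
      (fun counts container =>
        let name := pvName container
        if counts.contains name then counts.insert name (counts.getD name 0 + 1)
        else counts.insert name 1)
      PySem.Dict.empty
  PySem.List.sorted counts.values (fun x => x)

-- ===== PORT B =====
-- the run-length scan: while i < n: j := i+1; while names[j] == names[i]: j += 1; append (j - i)
def pvRunLengths : List String → List Int
  | [] => []
  | x :: xs =>
      ((xs.takeWhile (· == x)).length + 1 : Int) :: pvRunLengths (xs.dropWhile (· == x))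
termination_by l => l.length
decreasing_by
  simpa using Nat.lt_succ_of_le (List.length_dropWhile_le (· == x) xs)

def get_allocations_alt (container_dict : List (String × String)) : List Int :=
  let names :=
    (PySem.Dict.update PySem.Dict.empty container_dict).values.map (fun container => pvName container)
  let sortedNames := PySem.List.sorted names (fun x => x)
  PySem.List.sorted (pvRunLengths sortedNames) (fun x => x)

-- ===== PRECONDITION & SPEC =====
-- Pre_ excludes exactly the inputs where 'name, _id = container.split(":")' raises ValueError
-- (a dict value without exactly one ':'), on which both A and B raise.
def Pre_get_allocations (container_dict : List (String × String)) : Prop :=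
  ∀ v ∈ (PySem.Dict.update PySem.Dict.empty container_dict).values, PySem.Str.count v ":" = 1
instance (container_dict : List (String × String)) : Decidable (Pre_get_allocations container_dict) := by unfold Pre_get_allocations; infer_instance

def pvWitness_get_allocations : (List (String × String)) :=
  [("c1", "web:1"), ("c2", "web:2"), ("c3", "db:1")]

def Spec_get_allocations (container_dict : List (String × String)) (out : List Int) : Prop := out = get_allocations_alt container_dict
instance (container_dict : List (String × String)) (out : List Int) : Decidable (Spec_get_allocations container_dict out) := by unfold Spec_get_allocations; infer_instance

-- ===== CLAIM (what is proved, stated in full; the proofs are below) =====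
def Claim_equal_get_allocations : Prop := ∀ (container_dict : List (String × String)), Dom_get_allocations container_dict → Pre_get_allocations container_dict → Spec_get_allocations container_dict (get_allocations container_dict)

-- ===== LEMMAS AND PROOFS =====

-- A's counting loop is the Counter fold: in the missing-key branch getD returns 0.
theorem pv_fold_eq_counter (l : List String) :
    l.foldl
      (fun (counts : PySem.Dict String Int) container =>
        let name := pvName container
        if counts.contains name then counts.insert name (counts.getD name 0 + 1)
        else counts.insert name 1)
      PySem.Dict.empty
    = PySem.Dict.counter (l.map pvName) := by
  rw [← PySem.Dict.foldl_insert_getD_add_one_eq_counter, List.foldl_map]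
  apply PySem.List.foldl_congr_mem
  intro acc x _
  simp only []
  by_cases h : acc.contains (pvName x)
  · simp [h]
  · have hb : acc.contains (pvName x) = false := by simpa using h
    simp [hb, PySem.Dict.getD_of_not_contains acc 0 hb]

-- on a ≤-sorted list the run lengths are, up to order, the per-distinct-element counts
theorem pv_runLengths_sorted (ys : List String) (h : ys.Pairwise (· ≤ ·)) :
    (pvRunLengths ys).Perm ((PySem.Set.ofList ys).map (fun k => (ys.count k : Int))) := by
  fun_induction pvRunLengths ys with
  | case1 => simp [PySem.Set.ofList_nil]
  | case2 x xs ih =>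
    have hx : ∀ y ∈ xs, x ≤ y := (List.pairwise_cons.mp h).1
    have hxs : xs.Pairwise (· ≤ ·) := (List.pairwise_cons.mp h).2
    have hd : (xs.dropWhile (· == x)).Pairwise (· ≤ ·) :=
      hxs.sublist (List.dropWhile_sublist _)
    set t := xs.takeWhile (· == x) with ht_def
    set d := xs.dropWhile (· == x) with hd_def
    have ht : ∀ y ∈ t, y = x := by
      intro y hy; rw [ht_def] at hy; simpa using List.mem_takeWhile_imp hy
    have hxd : x ∉ d := by
      intro hmem
      cases hdq : d with
      | nil => rw [hdq] at hmem; exact absurd hmem (List.not_mem_nil)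
      | cons h0 d' =>
        have hne : h0 ≠ x := by
          have := List.head_dropWhile_not (· == x) (l := xs) (by rw [← hd_def, hdq]; simp)
          simp [← hd_def, hdq] at this; exact this
        have hmem0 : h0 ∈ xs := (List.dropWhile_sublist (l := xs) (· == x)).mem (by rw [← hd_def, hdq]; simp)
        have hlt : x < h0 := lt_of_le_of_ne (hx h0 hmem0) (Ne.symm hne)
        rw [hdq] at hmem hd
        rcases List.mem_cons.mp hmem with rfl | hmem'
        · exact hne rfl
        · exact absurd ((List.pairwise_cons.mp hd).1 x hmem') (by exact not_le.mpr hlt)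
    have hsplit : t ++ d = xs := List.takeWhile_append_dropWhile
    have hcount : (x :: xs).count x = t.length + 1 := by
      rw [List.count_cons_self, ← hsplit, List.count_append]
      have h1 : t.count x = t.length := List.count_eq_length.mpr (fun b hb => (ht b hb).symm)
      have h2 : d.count x = 0 := List.count_eq_zero.mpr hxd
      omega
    have hcountk : ∀ k ∈ d, (x :: xs).count k = d.count k := by
      intro k hk
      have hkx : k ≠ x := fun hkx => hxd (hkx ▸ hk)
      rw [List.count_cons_of_ne (Ne.symm hkx), ← hsplit, List.count_append]
      have h1 : t.count k = 0 := List.count_eq_zero.mpr (fun hmem => hkx (ht k hmem))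
      omega
    have hperm : (PySem.Set.ofList (x :: xs)).Perm (x :: PySem.Set.ofList d) := by
      rw [List.perm_ext_iff_of_nodup (PySem.Set.nodup_ofList _)
        (by
          refine List.nodup_cons.mpr ⟨?_, PySem.Set.nodup_ofList _⟩
          rw [PySem.Set.mem_ofList]; exact hxd)]
      intro a
      rw [PySem.Set.mem_ofList, List.mem_cons, List.mem_cons, PySem.Set.mem_ofList, ← hsplit,
        List.mem_append]
      constructor
      · rintro (rfl | hta | hda)
        · exact Or.inl rfl
        · exact Or.inl (ht a hta)
        · exact Or.inr hda
      · rintro (rfl | hda)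
        · exact Or.inl rfl
        · exact Or.inr (Or.inr hda)
    refine List.Perm.trans ?_ ((hperm.map (fun k => (((x :: xs).count k : Nat) : Int))).symm)
    rw [List.map_cons, hcount]
    push_cast
    refine List.Perm.cons _ ?_
    rw [List.map_congr_left (fun k hk => by
      rw [hcountk k ((PySem.Set.mem_ofList _ _).mp hk)])]
    exact ih hd

-- ===== VERDICT (by name: the statement is the Claim_ definition above) =====
theorem get_allocations_spec : Claim_equal_get_allocations := by
  intro cd _ _
  unfold Spec_get_allocations get_allocations get_allocations_alt
  simp only [pv_fold_eq_counter]
  set names := (PySem.Dict.update PySem.Dict.empty cd).values.map (fun container => pvName container) with hnames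
  set ys := PySem.List.sorted names (fun x => x) with hys
  have hsorted : ys.Pairwise (· ≤ ·) := by
    simpa using PySem.List.sorted_pairwise names (fun x => x)
  have hB := pv_runLengths_sorted ys hsorted
  have hc : (fun k => ((ys.count k : Nat) : Int)) = (fun k => ((names.count k : Nat) : Int)) := by
    funext k
    rw [(PySem.List.sorted_perm names (fun x => x) false).count_eq]
  have hset : (PySem.Set.ofList ys).Perm (PySem.Set.ofList names) := by
    rw [List.perm_ext_iff_of_nodup (PySem.Set.nodup_ofList _) (PySem.Set.nodup_ofList _)]
    intro a
    rw [PySem.Set.mem_ofList, PySem.Set.mem_ofList, hys, PySem.List.mem_sorted]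
  have hvals : (PySem.Dict.counter names).values
      = (PySem.Set.ofList names).map (fun k => ((names.count k : Nat) : Int)) := by
    simp only [PySem.Dict.values, PySem.Dict.items_counter, List.map_map]
    rfl
  rw [hvals]
  refine PySem.List.sorted_eq_sorted_of_perm _ _ (fun x => x) (fun a b hab => hab) ?_
  rw [hc] at hB
  exact ((hB.trans (hset.map _))).symm
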